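-- pv_equiv track=rewrite | github.com/khanna-vijay/Natural-Language-Processing---Dan-Jurafsky | WK03/CH08/viterbi.py | collect_probabilities
-- ===== SOURCE A (Python) =====
-- def collect_probabilities(_samples):
--     # collect frequency of tag types
--     tag_freq = {}
--     # collect frequency of words under a tag
--     word_per_tag_freq = {}
--     # bigram based on tag types
--     bigram = {}
--     # initial probability distributions
--     pi = {}
--     total_start = 0
--     samples_len = len(_samples)
--
--     # generate tag_freq, pi, and word_per_tag_freq first
--     for i in range(samples_len):
--         sample = _samples[i]
--         has_next = i + 1 < samples_len
--
--         # collect data for pi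
--         if has_next:
--             if _samples[i + 1][1] not in pi:
--                 pi.update({_samples[i + 1][1]: 2})
--             else:
--                 pi[_samples[i + 1][1]] += 1
--             total_start += 1
--
--         # count tag for tag_freq
--         if sample[1] not in tag_freq:
--             tag_freq.update({sample[1]: 2})
--             word_per_tag_freq.update({sample[1]: {sample[0]: 2}})
--         else:
--             tag_freq[sample[1]] += 1
--             if sample[0] not in word_per_tag_freq[sample[1]]:
--                 word_per_tag_freq[sample[1]].update({sample[0]: 2})
--             else:
--                 word_per_tag_freq[sample[1]][sample[0]] += 1
--
--     # create a matrix for bigram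
--     for tag_0 in tag_freq:
--         bigram.update({tag_0: {}})
--         for tag_1 in tag_freq:
--             bigram[tag_0].update({tag_1: 1})
--
--     # generate bigram counts
--     for i in range(samples_len):
--         sample = _samples[i]
--         has_next = i + 1 < samples_len
--
--         if has_next:
--             next_sample = _samples[i + 1]
--             bigram[sample[1]][next_sample[1]] += 1
--
--     return tag_freq, word_per_tag_freq, bigram, pi
-- ===== SOURCE B (Python) =====
-- def collect_probabilities(_samples):
--     # Declarative query-style rewrite: no mutating counting pass at all.
--     # Each output dict is built independently as a comprehension over the
--     # first-occurrence-ordered distinct keys (dict.fromkeys), with every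
--     # smoothed value obtained by a direct list.count query.
--     tags = [t for _, t in _samples]
--     tag_order = list(dict.fromkeys(tags))
--     tag_freq = {t: 1 + tags.count(t) for t in tag_order}
--     word_per_tag_freq = {}
--     for t in tag_order:
--         ws = [w for w, tt in _samples if tt == t]
--         word_per_tag_freq[t] = {w: 1 + ws.count(w) for w in dict.fromkeys(ws)}
--     tail = tags[1:]
--     pi = {t: 1 + tail.count(t) for t in dict.fromkeys(tail)}
--     bigram = {}
--     for t0 in tag_order:
--         succ = [b for a, b in zip(tags, tail) if a == t0]
--         bigram[t0] = {t1: 1 + succ.count(t1) for t1 in tag_order}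
--     return tag_freq, word_per_tag_freq, bigram, pi
-- ===== Notes on version B (the rewrite author's own statement) =====
-- stated objective: alternative
-- what changed: Replaces A's three mutating-dict passes (a fused smoothed counting pass, a dense bigram init over tag pairs, then a second scan incrementing bigram cells) by a declarative query-style construction with no counting pass at all: each output dict is a comprehension over the dict.fromkeys first-occurrence key order whose smoothed values are direct list.count queries (per-tag word lists and per-tag successor lists obtained by filtering).
import Mathlib
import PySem

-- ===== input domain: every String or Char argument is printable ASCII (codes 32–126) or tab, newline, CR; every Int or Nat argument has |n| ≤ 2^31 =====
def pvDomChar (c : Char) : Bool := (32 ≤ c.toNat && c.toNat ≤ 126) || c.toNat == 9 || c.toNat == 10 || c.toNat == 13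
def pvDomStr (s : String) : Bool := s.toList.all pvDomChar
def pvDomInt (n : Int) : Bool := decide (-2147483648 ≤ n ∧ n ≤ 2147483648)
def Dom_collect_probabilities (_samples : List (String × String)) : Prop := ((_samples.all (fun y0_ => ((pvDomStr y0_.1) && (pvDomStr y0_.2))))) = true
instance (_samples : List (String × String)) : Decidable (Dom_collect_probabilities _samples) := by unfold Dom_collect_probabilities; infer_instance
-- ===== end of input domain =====

-- B rebuilds every output dict declaratively (first-occurrence key order via dedup, smoothed
-- values as direct count queries over filtered lists) instead of A's three mutating-dict passes.

abbrev CPDI : Type := PySem.Dict String Int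
abbrev CPDDI : Type := PySem.Dict String CPDI
abbrev CPStA : Type := CPDI × CPDDI × CPDI × Int

-- ===== PORT A =====
-- body of A's first loop (one iteration of `for i in range(samples_len)`)
def cpA_step1 (_samples : List (String × String)) (samples_len : Int) (st : CPStA) (i : Int) : CPStA :=
  match PySem.List.pyGet? _samples i with
  | none => st  -- unreachable: i is always in range
  | some sample =>
    -- pi / total_start updates (the `if has_next` block)
    let pits : CPDI × Int :=
      if i + 1 < samples_len then
        match PySem.List.pyGet? _samples (i + 1) with
        | none => (st.2.2.1, st.2.2.2)  -- unreachable
        | some nxt =>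
          (if st.2.2.1.contains nxt.2 = false then st.2.2.1.insert nxt.2 2
           else st.2.2.1.modify nxt.2 0 (· + 1), st.2.2.2 + 1)
      else (st.2.2.1, st.2.2.2)
    if st.1.contains sample.2 = false then
      (st.1.insert sample.2 2,
       st.2.1.insert sample.2 (PySem.Dict.empty.insert sample.1 2),
       pits.1, pits.2)
    else
      (st.1.modify sample.2 0 (· + 1),
       st.2.1.insert sample.2
         (let inner := st.2.1.getD sample.2 PySem.Dict.empty
          if inner.contains sample.1 = false then inner.insert sample.1 2
          else inner.modify sample.1 0 (· + 1)),
       pits.1, pits.2)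

-- body of A's third loop (one iteration of the bigram-count loop)
def cpA_step3 (_samples : List (String × String)) (samples_len : Int) (bg : CPDDI) (i : Int) : CPDDI :=
  match PySem.List.pyGet? _samples i with
  | none => bg  -- unreachable
  | some sample =>
    if i + 1 < samples_len then
      match PySem.List.pyGet? _samples (i + 1) with
      | none => bg  -- unreachable
      | some next_sample =>
        -- bigram[sample[1]][next_sample[1]] += 1 ; both keys always exist, so modify-with-default-0 is exact
        bg.insert sample.2 ((bg.getD sample.2 PySem.Dict.empty).modify next_sample.2 0 (· + 1))
    else bg

def collect_probabilities (_samples : List (String × String)) : (List (String × Int)) × (List (String × List (String × Int))) × (List (String × List (String × Int))) × (List (String × Int)) :=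
  let samples_len : Int := _samples.length
  let st := (PySem.List.pyRange 0 samples_len 1).foldl (cpA_step1 _samples samples_len)
    (PySem.Dict.empty, PySem.Dict.empty, PySem.Dict.empty, 0)
  let tag_freq := st.1
  let word_per_tag_freq := st.2.1
  let pi := st.2.2.1
  -- create a matrix for bigram
  let bigram : CPDDI := tag_freq.keys.foldl
    (fun bg tag_0 =>
      let bg2 := bg.insert tag_0 PySem.Dict.empty
      tag_freq.keys.foldl
        (fun bg tag_1 => bg.insert tag_0 ((bg.getD tag_0 PySem.Dict.empty).insert tag_1 (1 : Int))) bg2)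
    PySem.Dict.empty
  -- generate bigram counts
  let bigram := (PySem.List.pyRange 0 samples_len 1).foldl (cpA_step3 _samples samples_len) bigram
  (tag_freq.items,
   word_per_tag_freq.items.map (fun p => (p.1, p.2.items)),
   bigram.items.map (fun p => (p.1, p.2.items)),
   pi.items)

-- ===== PORT B =====
def collect_probabilities_alt (_samples : List (String × String)) : (List (String × Int)) × (List (String × List (String × Int))) × (List (String × List (String × Int))) × (List (String × Int)) :=
  let tags := _samples.map (fun p => p.2)
  let tag_order := PySem.List.dedup tags
  let tag_freq := tag_order.map (fun t => (t, 1 + (tags.count t : Int)))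
  let word_per_tag_freq := tag_order.map (fun t =>
    let ws := (_samples.filter (fun p => p.2 == t)).map (fun p => p.1)
    (t, (PySem.List.dedup ws).map (fun w => (w, 1 + (ws.count w : Int)))))
  let tail := tags.drop 1
  let pi := (PySem.List.dedup tail).map (fun t => (t, 1 + (tail.count t : Int)))
  let bigram := tag_order.map (fun t0 =>
    let succ := ((tags.zip tail).filter (fun q => q.1 == t0)).map (fun q => q.2)
    (t0, tag_order.map (fun t1 => (t1, 1 + (succ.count t1 : Int)))))
  (tag_freq, word_per_tag_freq, bigram, pi)

-- ===== PRECONDITION & SPEC =====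
def Spec_collect_probabilities (_samples : List (String × String)) (out : (List (String × Int)) × (List (String × List (String × Int))) × (List (String × List (String × Int))) × (List (String × Int))) : Prop := out = collect_probabilities_alt _samples
instance (_samples : List (String × String)) (out : (List (String × Int)) × (List (String × List (String × Int))) × (List (String × List (String × Int))) × (List (String × Int))) : Decidable (Spec_collect_probabilities _samples out) := by
  unfold Spec_collect_probabilities
  exact (@instDecidableEqProd _ _ (by infer_instance)
    (@instDecidableEqProd _ _ (by infer_instance)
      (@instDecidableEqProd _ _ (by infer_instance) (by infer_instance))))
    out (collect_probabilities_alt _samples)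

-- ===== CLAIM (what is proved, stated in full; the proofs are below) =====
def Claim_equal_collect_probabilities : Prop := ∀ (_samples : List (String × String)), Dom_collect_probabilities _samples → Spec_collect_probabilities _samples (collect_probabilities _samples)

-- ===== LEMMAS AND PROOFS =====

def SC (xs : List String) : CPDI :=
  ⟨(PySem.List.dedup xs).map (fun t => (t, 1 + (xs.count t : Int)))⟩

theorem keys_SC (xs : List String) : (SC xs).keys = PySem.List.dedup xs := by
  simp [SC, PySem.Dict.keys, Function.comp_def]

theorem nodup_keys_SC (xs : List String) : (SC xs).keys.Nodup := by
  rw [keys_SC]; exact PySem.List.nodup_dedup xs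

theorem contains_SC (xs : List String) (k : String) :
    (SC xs).contains k = decide (k ∈ xs) := by
  rw [PySem.Dict.contains_eq_decide_mem_keys, keys_SC]
  simp

theorem getD_SC (xs : List String) (k : String) (hk : k ∈ xs) (d0 : Int) :
    (SC xs).getD k d0 = 1 + (xs.count k : Int) := by
  refine PySem.Dict.getD_of_mem_items (SC xs) ?_ (nodup_keys_SC xs) d0
  exact List.mem_map_of_mem ((PySem.List.mem_dedup xs k).2 hk)

theorem dedup_append_singleton (xs : List String) (k : String) :
    PySem.List.dedup (xs ++ [k]) =
      if k ∈ xs then PySem.List.dedup xs else PySem.List.dedup xs ++ [k] := by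
  rw [PySem.List.dedup, PySem.Set.ofList_append]
  show PySem.Set.add (PySem.Set.ofList xs) k = _
  rw [PySem.Set.add, PySem.Set.contains_eq_decide]
  simp [PySem.Set.mem_ofList, PySem.List.dedup]

def cntA (d : CPDI) (k : String) : CPDI :=
  if d.contains k = false then d.insert k 2 else d.modify k 0 (· + 1)

theorem cntA_step (xs : List String) (k : String) : cntA (SC xs) k = SC (xs ++ [k]) := by
  rw [cntA, contains_SC]
  by_cases hk : k ∈ xs
  · rw [if_neg (by simp [hk])]
    rw [PySem.Dict.modify]
    apply PySem.Dict.ext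
    rw [PySem.Dict.items_insert_of_contains _ _ (by rw [contains_SC]; simp [hk])]
    rw [getD_SC xs k hk]
    show ((PySem.List.dedup xs).map (fun t => (t, 1 + (xs.count t : Int)))).map _ =
      (PySem.List.dedup (xs ++ [k])).map _
    rw [dedup_append_singleton, if_pos hk, List.map_map]
    refine List.map_congr_left (fun t ht => ?_)
    by_cases htk : t = k
    · subst htk; simp [List.count_append]; ring
    · simp only [Function.comp_def]
      rw [if_neg (by simp [htk])]
      simp [List.count_append, Ne.symm htk]
  · rw [if_pos (by simp [hk])]
    apply PySem.Dict.ext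
    rw [PySem.Dict.items_insert_of_not_contains _ _ (by rw [contains_SC]; simp [hk])]
    show ((PySem.List.dedup xs).map _) ++ [(k, (2:Int))] = (PySem.List.dedup (xs ++ [k])).map _
    rw [dedup_append_singleton, if_neg hk, List.map_append]
    congr 1
    · refine List.map_congr_left (fun t ht => ?_)
      have htk : t ≠ k := fun h => hk (by simpa [h, PySem.List.mem_dedup] using ht)
      simp [List.count_append, Ne.symm htk]
    · have : xs.count k = 0 := List.count_eq_zero.2 hk
      simp [List.count_append, this]

theorem fold_cntA (ys xs : List String) : ys.foldl cntA (SC xs) = SC (xs ++ ys) := by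
  induction ys generalizing xs with
  | nil => simp
  | cons y ys ih =>
    rw [List.foldl_cons, cntA_step, ih]
    simp

theorem SC_nil : SC [] = PySem.Dict.empty := rfl


def wordsOf (p : List (String × String)) (t : String) : List String :=
  (p.filter (fun q => q.2 == t)).map (fun q => q.1)

def WD (p : List (String × String)) : CPDDI :=
  ⟨(PySem.List.dedup (p.map (fun q => q.2))).map (fun t => (t, SC (wordsOf p t)))⟩

theorem WD_nil : WD [] = PySem.Dict.empty := rfl

theorem keys_WD (p : List (String × String)) :
    (WD p).keys = PySem.List.dedup (p.map (fun q => q.2)) := by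
  simp [WD, PySem.Dict.keys, Function.comp_def]

theorem nodup_keys_WD (p : List (String × String)) : (WD p).keys.Nodup := by
  rw [keys_WD]; exact PySem.List.nodup_dedup _

theorem contains_WD (p : List (String × String)) (k : String) :
    (WD p).contains k = decide (k ∈ p.map (fun q => q.2)) := by
  rw [PySem.Dict.contains_eq_decide_mem_keys, keys_WD]
  simp

theorem getD_WD (p : List (String × String)) (k : String) (hk : k ∈ p.map (fun q => q.2)) :
    (WD p).getD k PySem.Dict.empty = SC (wordsOf p k) := by
  refine PySem.Dict.getD_of_mem_items (WD p) ?_ (nodup_keys_WD p) _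
  exact List.mem_map_of_mem ((PySem.List.mem_dedup _ k).2 hk)

theorem wordsOf_append (p : List (String × String)) (x : String × String) (t : String) :
    wordsOf (p ++ [x]) t = wordsOf p t ++ (if x.2 = t then [x.1] else []) := by
  rw [wordsOf, List.filter_append, List.map_append, wordsOf]
  congr 1
  by_cases h : x.2 = t <;> simp [h]

def twA (tw : CPDI × CPDDI) (x : String × String) : CPDI × CPDDI :=
  if tw.1.contains x.2 = false then
    (tw.1.insert x.2 2, tw.2.insert x.2 (PySem.Dict.empty.insert x.1 2))
  else
    (tw.1.modify x.2 0 (· + 1),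
     tw.2.insert x.2
       (let inner := tw.2.getD x.2 PySem.Dict.empty
        if inner.contains x.1 = false then inner.insert x.1 2
        else inner.modify x.1 0 (· + 1)))

theorem cntA_mem (xs : List String) (k : String) (hk : k ∈ xs) :
    (SC xs).modify k 0 (· + 1) = SC (xs ++ [k]) := by
  have h := cntA_step xs k
  rwa [cntA, contains_SC, if_neg (by simp [hk])] at h

theorem cntA_not_mem (xs : List String) (k : String) (hk : k ∉ xs) :
    (SC xs).insert k 2 = SC (xs ++ [k]) := by
  have h := cntA_step xs k
  rwa [cntA, contains_SC, if_pos (by simp [hk])] at h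

theorem wordsOf_not_mem (p : List (String × String)) (t : String)
    (h : t ∉ p.map (fun q => q.2)) : wordsOf p t = [] := by
  rw [wordsOf, List.map_eq_nil_iff, List.filter_eq_nil_iff]
  intro q hq
  simp only [beq_iff_eq]
  exact fun he => h (he ▸ List.mem_map_of_mem hq)

theorem tw_step (p : List (String × String)) (x : String × String) :
    twA (SC (p.map (fun q => q.2)), WD p) x
      = (SC ((p ++ [x]).map (fun q => q.2)), WD (p ++ [x])) := by
  have hmap : (p ++ [x]).map (fun q => q.2) = p.map (fun q => q.2) ++ [x.2] := by simp
  rw [twA, contains_SC, hmap]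
  by_cases hx : x.2 ∈ p.map (fun q => q.2)
  · rw [if_neg (by simp [hx])]
    refine Prod.ext (cntA_mem _ _ hx) ?_
    show (WD p).insert x.2 _ = WD (p ++ [x])
    rw [getD_WD p x.2 hx]
    have hinner : (if (SC (wordsOf p x.2)).contains x.1 = false
        then (SC (wordsOf p x.2)).insert x.1 2
        else (SC (wordsOf p x.2)).modify x.1 0 (· + 1)) = SC (wordsOf p x.2 ++ [x.1]) :=
      cntA_step (wordsOf p x.2) x.1
    apply PySem.Dict.ext
    rw [PySem.Dict.items_insert_of_contains _ _ (by rw [contains_WD]; simp [hx])]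
    show ((PySem.List.dedup (p.map (fun q => q.2))).map _).map _ = _
    rw [WD]
    show _ = (PySem.List.dedup ((p ++ [x]).map (fun q => q.2))).map _
    rw [hmap, dedup_append_singleton, if_pos hx, List.map_map]
    refine List.map_congr_left (fun t ht => ?_)
    simp only [Function.comp_def]
    by_cases htx : t = x.2
    · subst htx
      rw [if_pos (by simp), hinner, wordsOf_append, if_pos rfl]
    · rw [if_neg (by simp [htx]), wordsOf_append, if_neg (fun h => htx h.symm)]
      simp
  · rw [if_pos (by simp [hx])]
    refine Prod.ext (cntA_not_mem _ _ hx) ?_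
    show (WD p).insert x.2 (PySem.Dict.empty.insert x.1 2) = WD (p ++ [x])
    have hsingle : PySem.Dict.empty.insert x.1 2 = SC [x.1] := by
      have h := cntA_not_mem [] x.1 (by simp)
      rw [SC_nil] at h
      simpa using h
    apply PySem.Dict.ext
    rw [PySem.Dict.items_insert_of_not_contains _ _ (by rw [contains_WD]; simp [hx])]
    rw [WD]
    show ((PySem.List.dedup (p.map (fun q => q.2))).map _) ++ _ = (WD (p ++ [x])).items
    rw [WD]
    show _ = (PySem.List.dedup ((p ++ [x]).map (fun q => q.2))).map _
    rw [hmap, dedup_append_singleton, if_neg hx, List.map_append]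
    congr 1
    · refine List.map_congr_left (fun t ht => ?_)
      have htx : x.2 ≠ t := fun h => hx (by simpa [h, PySem.List.mem_dedup] using ht)
      rw [wordsOf_append, if_neg htx]
      simp
    · rw [hsingle]
      simp only [List.map_cons, List.map_nil]
      rw [wordsOf_append, if_pos rfl, wordsOf_not_mem p x.2 hx]
      simp

theorem tw_fold (xs p : List (String × String)) :
    xs.foldl twA (SC (p.map (fun q => q.2)), WD p)
      = (SC ((p ++ xs).map (fun q => q.2)), WD (p ++ xs)) := by
  induction xs generalizing p with
  | nil => simp
  | cons y ys ih =>
    rw [List.foldl_cons, tw_step, ih]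
    simp

def MT (ks : List String) (ps : List (String × String)) : CPDDI :=
  ⟨ks.map (fun t0 => (t0, (⟨ks.map (fun t1 => (t1, 1 + (ps.count (t0, t1) : Int)))⟩ : CPDI)))⟩

theorem rowFold (ks : List String) (bg : CPDDI) (t0 : String) (r : CPDI) :
    ks.foldl (fun bg tag_1 => bg.insert t0 ((bg.getD t0 PySem.Dict.empty).insert tag_1 (1 : Int)))
        (bg.insert t0 r)
      = bg.insert t0 (ks.foldl (fun r t1 => r.insert t1 (1 : Int)) r) := by
  induction ks generalizing r with
  | nil => rfl
  | cons t1 ks ih =>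
    rw [List.foldl_cons, List.foldl_cons, PySem.Dict.getD_insert_self,
      PySem.Dict.insert_insert_self, ih]

theorem rowInit (ks : List String) (hnd : ks.Nodup) :
    ks.foldl (fun r t1 => r.insert t1 (1 : Int)) PySem.Dict.empty
      = ⟨ks.map (fun t1 => (t1, (1 : Int)))⟩ := by
  apply PySem.Dict.ext
  have h := PySem.Dict.items_foldl_insert_fresh ks (fun a => a) (fun _ => (1 : Int))
    PySem.Dict.empty (fun a _ => PySem.Dict.contains_empty a) (by simpa using hnd)
  simpa using h

theorem bigInit (ks : List String) (hnd : ks.Nodup) :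
    ks.foldl
        (fun bg tag_0 =>
          let bg2 := bg.insert tag_0 PySem.Dict.empty
          ks.foldl
            (fun bg tag_1 => bg.insert tag_0 ((bg.getD tag_0 PySem.Dict.empty).insert tag_1 (1 : Int))) bg2)
        PySem.Dict.empty
      = MT ks [] := by
  have hbody : ∀ (bg : CPDDI) (t0 : String),
      (let bg2 := bg.insert t0 PySem.Dict.empty
       ks.foldl (fun bg tag_1 => bg.insert t0 ((bg.getD t0 PySem.Dict.empty).insert tag_1 (1 : Int))) bg2)
      = bg.insert t0 (⟨ks.map (fun t1 => (t1, (1 : Int)))⟩ : CPDI) := by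
    intro bg t0
    show ks.foldl _ (bg.insert t0 PySem.Dict.empty) = _
    rw [rowFold, rowInit ks hnd]
  rw [PySem.List.foldl_congr_mem ks _ _ PySem.Dict.empty (fun bg t0 _ => hbody bg t0)]
  apply PySem.Dict.ext
  have h := PySem.Dict.items_foldl_insert_fresh ks (fun a => a)
    (fun _ => (⟨ks.map (fun t1 => (t1, (1 : Int)))⟩ : CPDI))
    PySem.Dict.empty (fun a _ => PySem.Dict.contains_empty a) (by simpa using hnd)
  simp only [MT]
  simpa using h

def MTrow (ks : List String) (ps : List (String × String)) (t0 : String) : CPDI :=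
  ⟨ks.map (fun t1 => (t1, 1 + (ps.count (t0, t1) : Int)))⟩

theorem keys_MT (ks : List String) (ps : List (String × String)) : (MT ks ps).keys = ks := by
  simp [MT, PySem.Dict.keys, Function.comp_def]

theorem keys_MTrow (ks : List String) (ps : List (String × String)) (t0 : String) :
    (MTrow ks ps t0).keys = ks := by
  simp [MTrow, PySem.Dict.keys, Function.comp_def]

theorem getD_MT (ks : List String) (hnd : ks.Nodup) (ps : List (String × String))
    (t0 : String) (h : t0 ∈ ks) :
    (MT ks ps).getD t0 PySem.Dict.empty = MTrow ks ps t0 := by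
  refine PySem.Dict.getD_of_mem_items (MT ks ps) ?_ (by rw [keys_MT]; exact hnd) _
  exact List.mem_map_of_mem h

theorem getD_MTrow (ks : List String) (hnd : ks.Nodup) (ps : List (String × String))
    (t0 t1 : String) (h : t1 ∈ ks) :
    (MTrow ks ps t0).getD t1 0 = 1 + (ps.count (t0, t1) : Int) := by
  refine PySem.Dict.getD_of_mem_items (MTrow ks ps t0) ?_ (by rw [keys_MTrow]; exact hnd) _
  exact List.mem_map_of_mem h

def bumpA (bg : CPDDI) (ab : String × String) : CPDDI :=
  bg.insert ab.1 ((bg.getD ab.1 PySem.Dict.empty).modify ab.2 0 (· + 1))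

theorem bump_step (ks : List String) (hnd : ks.Nodup) (ps : List (String × String))
    (ab : String × String) (ha : ab.1 ∈ ks) (hb : ab.2 ∈ ks) :
    bumpA (MT ks ps) ab = MT ks (ps ++ [ab]) := by
  rw [bumpA, getD_MT ks hnd ps ab.1 ha, PySem.Dict.modify, getD_MTrow ks hnd ps ab.1 ab.2 hb]
  have hrow : (MTrow ks ps ab.1).insert ab.2 (1 + (ps.count (ab.1, ab.2) : Int) + 1)
      = MTrow ks (ps ++ [ab]) ab.1 := by
    apply PySem.Dict.ext
    rw [PySem.Dict.items_insert_of_contains _ _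
      (by rw [PySem.Dict.contains_eq_decide_mem_keys, keys_MTrow]; simp [hb])]
    show ((ks.map _).map _ : List (String × Int)) = ks.map _
    rw [List.map_map]
    refine List.map_congr_left (fun t1 ht1 => ?_)
    simp only [Function.comp_def]
    by_cases h1 : t1 = ab.2
    · subst h1
      rw [if_pos (by simp)]
      simp [List.count_append]
      ring
    · rw [if_neg (by simp [h1])]
      have : List.count (ab.1, t1) [ab] = 0 :=
        List.count_eq_zero.2 (by simp [Prod.ext_iff]; exact fun he => h1 he)
      simp [List.count_append, this]
  rw [hrow]
  apply PySem.Dict.ext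
  rw [PySem.Dict.items_insert_of_contains _ _
    (by rw [PySem.Dict.contains_eq_decide_mem_keys, keys_MT]; simp [ha])]
  show ((ks.map _).map _ : List (String × CPDI)) = ks.map _
  rw [List.map_map]
  refine List.map_congr_left (fun t0 ht0 => ?_)
  simp only [Function.comp_def]
  by_cases h0 : t0 = ab.1
  · subst h0
    rw [if_pos (by simp)]
    simp [MTrow]
  · rw [if_neg (by simp [h0])]
    have : ∀ t1, List.count (t0, t1) [ab] = 0 := fun t1 =>
      List.count_eq_zero.2 (by simp [Prod.ext_iff]; intro he; exact absurd he h0)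
    simp [List.count_append, this]

theorem bump_fold (qs : List (String × String)) (ks : List String) (hnd : ks.Nodup)
    (ps : List (String × String)) (h : ∀ ab ∈ qs, ab.1 ∈ ks ∧ ab.2 ∈ ks) :
    qs.foldl bumpA (MT ks ps) = MT ks (ps ++ qs) := by
  induction qs generalizing ps with
  | nil => simp
  | cons q qs ih =>
    rw [List.foldl_cons, bump_step ks hnd ps q (h q (by simp)).1 (h q (by simp)).2,
      ih (ps ++ [q]) (fun ab hab => h ab (by simp [hab]))]
    simp

theorem count_succ (l : List (String × String)) (t0 t1 : String) :
    ((l.filter (fun q => q.1 == t0)).map (fun q => q.2)).count t1 = l.count (t0, t1) := by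
  induction l with
  | nil => rfl
  | cons q l ih =>
    by_cases h0 : q.1 = t0 <;> by_cases h1 : q.2 = t1 <;>
      simp [List.count_cons, h0, h1, ih, Prod.ext_iff]


theorem cpA_step1_eval (xs : List (String × String)) (k : Nat) (hk : k < xs.length) (st : CPStA) :
    cpA_step1 xs (xs.length : Int) st (k : Int)
      = ((twA (st.1, st.2.1) xs[k]).1, (twA (st.1, st.2.1) xs[k]).2,
         (if h : k + 1 < xs.length then cntA st.2.2.1 (xs[k + 1].2) else st.2.2.1),
         (if k + 1 < xs.length then st.2.2.2 + 1 else st.2.2.2)) := by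
  have hget : PySem.List.pyGet? xs (k : Int) = some xs[k] := by
    rw [PySem.List.pyGet?_natCast, List.getElem?_eq_getElem hk]
  by_cases hn : k + 1 < xs.length
  · have hn' : (k : Int) + 1 < (xs.length : Int) := by exact_mod_cast hn
    have hget2 : PySem.List.pyGet? xs ((k : Int) + 1) = some xs[k + 1] := by
      have : ((k : Int) + 1) = ((k + 1 : Nat) : Int) := by push_cast; ring
      rw [this, PySem.List.pyGet?_natCast, List.getElem?_eq_getElem hn]
    simp only [cpA_step1, hget, hget2, twA, cntA, if_pos hn', dif_pos hn, if_pos hn]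
    by_cases hc : st.1.contains xs[k].2 = false <;> simp [hc]
  · have hn' : ¬ ((k : Int) + 1 < (xs.length : Int)) := by exact_mod_cast hn
    simp only [cpA_step1, hget, twA, if_neg hn', dif_neg hn, if_neg hn]
    by_cases hc : st.1.contains xs[k].2 = false <;> simp [hc]

theorem loop1_eq (m : Nat) : ∀ (xs : List (String × String)) (k : Nat),
    xs.length - k = m → k ≤ xs.length → ∀ st : CPStA,
    (PySem.List.pyRange (k : Int) (xs.length : Int) 1).foldl (cpA_step1 xs (xs.length : Int)) st
      = (((xs.drop k).foldl twA (st.1, st.2.1)).1,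
         ((xs.drop k).foldl twA (st.1, st.2.1)).2,
         ((xs.drop (k + 1)).map (fun q => q.2)).foldl cntA st.2.2.1,
         st.2.2.2 + ((xs.drop (k + 1)).length : Int)) := by
  induction m with
  | zero =>
    intro xs k hm hk st
    have hk' : k = xs.length := by omega
    rw [PySem.List.pyRange_one_eq_nil (by exact_mod_cast hk'.ge)]
    rw [List.drop_eq_nil_of_le hk'.ge, List.drop_eq_nil_of_le (by omega)]
    simp
  | succ n ih =>
    intro xs k hm hk st
    have hklt : k < xs.length := by omega
    rw [PySem.List.pyRange_one_cons (by exact_mod_cast hklt), List.foldl_cons,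
      cpA_step1_eval xs k hklt st]
    have hcast : (k : Int) + 1 = ((k + 1 : Nat) : Int) := by push_cast; ring
    rw [hcast, ih xs (k + 1) (by omega) (by omega)]
    rw [List.drop_eq_getElem_cons hklt]
    by_cases hn : k + 1 < xs.length
    · rw [dif_pos hn, if_pos hn, List.drop_eq_getElem_cons hn]
      simp only [List.foldl_cons, List.map_cons, Prod.mk.eta, List.length_cons,
        List.length_drop, Prod.mk.injEq, true_and]
      push_cast
      omega
    · have h1 : xs.drop (k + 1) = [] := List.drop_eq_nil_of_le (by omega)
      have h2 : xs.drop (k + 1 + 1) = [] := List.drop_eq_nil_of_le (by omega)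
      rw [dif_neg hn, if_neg hn, h1, h2]
      simp [Prod.mk.eta]

theorem cpA_step3_eval (xs : List (String × String)) (k : Nat) (hk : k < xs.length) (bg : CPDDI) :
    cpA_step3 xs (xs.length : Int) bg (k : Int)
      = (if h : k + 1 < xs.length then bumpA bg (xs[k].2, xs[k + 1].2) else bg) := by
  have hget : PySem.List.pyGet? xs (k : Int) = some xs[k] := by
    rw [PySem.List.pyGet?_natCast, List.getElem?_eq_getElem hk]
  by_cases hn : k + 1 < xs.length
  · have hn' : (k : Int) + 1 < (xs.length : Int) := by exact_mod_cast hn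
    have hget2 : PySem.List.pyGet? xs ((k : Int) + 1) = some xs[k + 1] := by
      have h : ((k : Int) + 1) = ((k + 1 : Nat) : Int) := by push_cast; ring
      rw [h, PySem.List.pyGet?_natCast, List.getElem?_eq_getElem hn]
    simp only [cpA_step3, hget, hget2, bumpA, if_pos hn', dif_pos hn]
  · have hn' : ¬ ((k : Int) + 1 < (xs.length : Int)) := by exact_mod_cast hn
    simp only [cpA_step3, hget, if_neg hn', dif_neg hn]

theorem loop3_eq (m : Nat) : ∀ (xs : List (String × String)) (k : Nat),
    xs.length - k = m → k ≤ xs.length → ∀ bg : CPDDI,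
    (PySem.List.pyRange (k : Int) (xs.length : Int) 1).foldl (cpA_step3 xs (xs.length : Int)) bg
      = (((xs.drop k).map (fun q => q.2)).zip ((xs.drop (k + 1)).map (fun q => q.2))).foldl bumpA bg := by
  induction m with
  | zero =>
    intro xs k hm hk bg
    have hk' : k = xs.length := by omega
    rw [PySem.List.pyRange_one_eq_nil (by exact_mod_cast hk'.ge)]
    rw [List.drop_eq_nil_of_le hk'.ge]
    simp
  | succ n ih =>
    intro xs k hm hk bg
    have hklt : k < xs.length := by omega
    rw [PySem.List.pyRange_one_cons (by exact_mod_cast hklt), List.foldl_cons,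
      cpA_step3_eval xs k hklt bg]
    have hcast : (k : Int) + 1 = ((k + 1 : Nat) : Int) := by push_cast; ring
    rw [hcast, ih xs (k + 1) (by omega) (by omega)]
    by_cases hn : k + 1 < xs.length
    · rw [dif_pos hn]
      rw [List.drop_eq_getElem_cons hklt, List.drop_eq_getElem_cons hn]
      simp only [List.map_cons, List.zip_cons_cons, List.foldl_cons]
    · have h1 : xs.drop (k + 1) = [] := List.drop_eq_nil_of_le (by omega)
      have h2 : xs.drop (k + 1 + 1) = [] := List.drop_eq_nil_of_le (by omega)
      rw [dif_neg hn]
      rw [List.drop_eq_getElem_cons hklt, h1, h2]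
      simp

-- ===== VERDICT (by name: the statement is the Claim_ definition above) =====
theorem collect_probabilities_spec : Claim_equal_collect_probabilities := by
  intro xs _hdom
  show collect_probabilities xs = collect_probabilities_alt xs
  simp only [collect_probabilities, collect_probabilities_alt]
  have h1 := loop1_eq xs.length xs 0 (by omega) (by omega)
    (PySem.Dict.empty, PySem.Dict.empty, PySem.Dict.empty, 0)
  simp only [Nat.cast_zero, List.drop_zero, zero_add] at h1
  rw [h1]
  have htw := tw_fold xs []
  simp only [List.map_nil, List.nil_append] at htw
  rw [SC_nil, WD_nil] at htw
  rw [htw]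
  have hpi := fold_cntA ((xs.drop 1).map (fun q => q.2)) []
  rw [SC_nil] at hpi
  simp only [List.nil_append] at hpi
  rw [hpi]
  rw [keys_SC]
  set tags := xs.map (fun q => q.2) with htags
  set ks := PySem.List.dedup tags with hks
  have hnd : ks.Nodup := PySem.List.nodup_dedup tags
  rw [bigInit ks hnd]
  have h3 := loop3_eq xs.length xs 0 (by omega) (by omega) (MT ks [])
  simp only [Nat.cast_zero, List.drop_zero, zero_add] at h3
  rw [h3]
  have hzip : ∀ ab ∈ (tags.zip ((xs.drop 1).map (fun q => q.2))), ab.1 ∈ ks ∧ ab.2 ∈ ks := by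
    intro ab hab
    have h12 := List.of_mem_zip hab
    constructor
    · exact (PySem.List.mem_dedup _ _).2 h12.1
    · obtain ⟨q, hq, hq2⟩ := List.mem_map.1 h12.2
      exact (PySem.List.mem_dedup _ _).2 (hq2 ▸ List.mem_map_of_mem (List.mem_of_mem_drop hq))
  rw [bump_fold _ ks hnd [] hzip]
  simp only [List.nil_append]
  have hdm : (xs.drop 1).map (fun q => q.2) = tags.drop 1 := by rw [htags, List.map_drop]
  refine congrArg₂ _ rfl (congrArg₂ _ ?_ (congrArg₂ _ ?_ ?_))
  · -- word_per_tag_freq component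
    show (WD xs).items.map _ = _
    rw [WD]
    simp only [List.map_map]
    rfl
  · -- bigram component
    show (MT ks (tags.zip ((xs.drop 1).map (fun q => q.2)))).items.map _ = _
    rw [MT, hdm]
    simp only [List.map_map]
    refine List.map_congr_left (fun t0 _ => ?_)
    simp only [Function.comp_def]
    refine congrArg _ (List.map_congr_left (fun t1 _ => ?_))
    rw [count_succ]
  · -- pi component
    rw [hdm]
    rfl
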